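-- pv_equiv track=rewrite | github.com/vorarakmua-svg/ai-stock-analysis | value-invest-ai/backend/app/data_providers/eodhd.py | normalize_ticker
-- ===== SOURCE A (Python) =====
-- def normalize_ticker(ticker: str, market: str) -> str:
--     """
--     Convert to EOD ticker format.
--
--     EOD Format:
--     - US stocks: AAPL.US, MSFT.US (.US suffix required)
--     - Thai stocks: PTT.BK, CPALL.BK (.BK suffix)
--
--     Args:
--         ticker: Base ticker symbol
--         market: 'US' or 'SET'
--
--     Returns:
--         EOD-formatted ticker
--     """
--     ticker = ticker.upper().strip()
--
--     # Remove any existing suffix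
--     for suffix in [".BK", ".US", ".NYSE", ".NASDAQ"]:
--         if ticker.endswith(suffix):
--             ticker = ticker[:-len(suffix)]
--             break
--
--     # Apply market-specific suffix
--     if market == "SET":
--         return f"{ticker}.BK"
--     return f"{ticker}.US"
-- ===== SOURCE B (Python) =====
-- def normalize_ticker(ticker: str, market: str) -> str:
--     """Convert to EOD ticker format (idiomatic rewrite: rpartition + set lookup)."""
--     ticker = ticker.upper().strip()
--     base, dot, suf = ticker.rpartition(".")
--     if dot and suf in {"BK", "US", "NYSE", "NASDAQ"}:
--         ticker = base
--     return f"{ticker}.BK" if market == "SET" else f"{ticker}.US"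
-- ===== Notes on version B (the rewrite author's own statement) =====
-- stated objective: idiomatic
-- what changed: Replaces the 4-iteration endswith/break loop with a single rpartition('.') plus a set-membership test on the part after the last dot.
import Mathlib
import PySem

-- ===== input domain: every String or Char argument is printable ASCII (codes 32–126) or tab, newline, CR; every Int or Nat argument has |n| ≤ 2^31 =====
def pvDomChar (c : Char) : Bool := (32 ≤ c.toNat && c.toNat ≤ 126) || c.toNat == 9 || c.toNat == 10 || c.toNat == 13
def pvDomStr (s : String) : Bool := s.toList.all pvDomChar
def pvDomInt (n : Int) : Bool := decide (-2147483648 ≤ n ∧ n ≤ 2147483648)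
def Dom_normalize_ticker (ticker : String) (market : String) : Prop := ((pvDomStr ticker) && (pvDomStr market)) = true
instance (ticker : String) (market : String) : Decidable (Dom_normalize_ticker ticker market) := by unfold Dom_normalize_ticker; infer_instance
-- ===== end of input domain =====

set_option maxRecDepth 2000


-- B replaces A's four-iteration endswith/break loop by one rpartition at the last dot plus a set-membership
-- test on the trailing component (idiomatic; same cost). Equivalence of the return values is proved below.

-- ===== PORT A =====
-- the `for suffix in [...]: if ticker.endswith(suffix): ticker = ticker[:-len(suffix)]; break` loop
def normSuffixLoopA (t : List Char) : List (List Char) → List Char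
  | [] => t
  | s :: rest =>
      if PySem.Chars.endswith t s then PySem.Chars.slice t none (some (-(s.length : Int)))
      else normSuffixLoopA t rest

def normalize_ticker (ticker : String) (market : String) : String :=
  let t := PySem.Chars.strip (PySem.Chars.upper ticker.toList)
  let t := normSuffixLoopA t [['.','B','K'], ['.','U','S'], ['.','N','Y','S','E'], ['.','N','A','S','D','A','Q']]
  if market = "SET" then String.ofList (t ++ ['.','B','K']) else String.ofList (t ++ ['.','U','S'])

-- ===== PORT B =====
-- ticker.rpartition('.')  →  (base, dot, suf)
def rpartitionDot (t : List Char) : List Char × List Char × List Char :=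
  match t.reverse.dropWhile (· ≠ '.') with
  | [] => ([], [], t)
  | _ :: rest => (rest.reverse, ['.'], (t.reverse.takeWhile (· ≠ '.')).reverse)

-- `if dot and suf in {"BK","US","NYSE","NASDAQ"}: ticker = base`
def stripKnownSuffixB (t : List Char) : List Char :=
  let r := rpartitionDot t
  if r.2.1 ≠ [] ∧ r.2.2 ∈ [['B','K'], ['U','S'], ['N','Y','S','E'], ['N','A','S','D','A','Q']] then r.1 else t

def normalize_ticker_alt (ticker : String) (market : String) : String :=
  let t := stripKnownSuffixB (PySem.Chars.strip (PySem.Chars.upper ticker.toList))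
  if market = "SET" then String.ofList (t ++ ['.','B','K']) else String.ofList (t ++ ['.','U','S'])

-- ===== PRECONDITION & SPEC =====
def Spec_normalize_ticker (ticker : String) (market : String) (out : String) : Prop := out = normalize_ticker_alt ticker market
instance (ticker : String) (market : String) (out : String) : Decidable (Spec_normalize_ticker ticker market out) := by unfold Spec_normalize_ticker; infer_instance

-- ===== CLAIM (what is proved, stated in full; the proofs are below) =====
def Claim_equal_normalize_ticker : Prop := ∀ (ticker : String) (market : String), Dom_normalize_ticker ticker market → Spec_normalize_ticker ticker market (normalize_ticker ticker market)

-- ===== LEMMAS AND PROOFS =====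

lemma takeWhile_append_cons {α : Type} (p : α → Bool) (l₁ : List α) (a : α) (l₂ : List α)
    (h1 : ∀ x ∈ l₁, p x = true) (h2 : p a = false) :
    (l₁ ++ a :: l₂).takeWhile p = l₁ ∧ (l₁ ++ a :: l₂).dropWhile p = a :: l₂ := by
  induction l₁ with
  | nil => simp [h2]
  | cons x xs ih =>
      have hx : p x = true := h1 x (by simp)
      have := ih (fun y hy => h1 y (by simp [hy]))
      simp [hx, this.1, this.2]

lemma dropWhile_head_false {α : Type} (p : α → Bool) (l : List α) (a : α) (rest : List α)
    (h : l.dropWhile p = a :: rest) : p a = false := by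
  induction l with
  | nil => simp at h
  | cons x xs ih =>
      by_cases hx : p x = true
      · exact ih (by simpa [List.dropWhile, hx] using h)
      · simp [List.dropWhile, Bool.eq_false_iff.mpr hx] at h
        simpa [h.1] using Bool.eq_false_iff.mpr hx

-- endswith t ('.'::s) for a dot-free s characterised via the split at the LAST dot
lemma ends_iff (t s : List Char) (hs : ∀ c ∈ s, c ≠ '.') :
    PySem.Chars.endswith t ('.' :: s) = true ↔
      (t.reverse.dropWhile (· ≠ '.') ≠ [] ∧ t.reverse.takeWhile (· ≠ '.') = s.reverse) := by
  rw [PySem.Chars.endswith_iff]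
  constructor
  · rintro ⟨w, hw⟩
    have hrev : t.reverse = s.reverse ++ '.' :: w.reverse := by
      subst hw; simp
    have hp : ∀ x ∈ s.reverse, (decide (x ≠ '.')) = true := by
      intro x hx; simpa using hs x (by simpa using hx)
    have := takeWhile_append_cons (fun c => decide (c ≠ '.')) s.reverse '.' w.reverse hp (by simp)
    rw [hrev]
    exact ⟨by rw [this.2]; simp, this.1⟩
  · rintro ⟨hne, htake⟩
    obtain ⟨c, rest, hq⟩ : ∃ c rest, t.reverse.dropWhile (· ≠ '.') = c :: rest := by
      cases hq : t.reverse.dropWhile (· ≠ '.') with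
      | nil => exact absurd hq hne
      | cons c rest => exact ⟨c, rest, rfl⟩
    have hc : c = '.' := by
      have := dropWhile_head_false (fun c => decide (c ≠ '.')) t.reverse c rest hq
      simpa using this
    have hdecomp : t.reverse = s.reverse ++ '.' :: rest := by
      conv_lhs => rw [← List.takeWhile_append_dropWhile (p := fun c => decide (c ≠ '.')) (l := t.reverse)]
      rw [htake, hq, hc]
    refine ⟨rest.reverse, ?_⟩
    have : t = (s.reverse ++ '.' :: rest).reverse := by
      rw [← hdecomp]; simp
    simpa using this.symm

-- when the part after the last dot is s
lemma strip_pos (t s rest : List Char)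
    (hq : t.reverse.dropWhile (· ≠ '.') = '.' :: rest)
    (htake : t.reverse.takeWhile (· ≠ '.') = s.reverse) :
    PySem.Chars.slice t none (some (-((('.' :: s).length : Nat) : Int))) = rest.reverse ∧
      t = rest.reverse ++ '.' :: s := by
  have hdecomp : t.reverse = s.reverse ++ '.' :: rest := by
    conv_lhs => rw [← List.takeWhile_append_dropWhile (p := fun c => decide (c ≠ '.')) (l := t.reverse)]
    rw [htake, hq]
  have ht : t = rest.reverse ++ '.' :: s := by
    have : t = (s.reverse ++ '.' :: rest).reverse := by rw [← hdecomp]; simp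
    simpa using this
  refine ⟨?_, ht⟩
  rw [PySem.Chars.slice_eq_listSlice,
      PySem.List.slice_to_neg_natCast t (('.' :: s).length) (by simp), ht]
  have hlen : (rest.reverse ++ '.' :: s).length - ('.' :: s).length = rest.length := by
    simp
  rw [hlen]
  exact List.take_left' (by simp)

-- core equality: A's suffix loop = B's rpartition-based strip
lemma core_eq (t : List Char) :
    normSuffixLoopA t [['.','B','K'], ['.','U','S'], ['.','N','Y','S','E'], ['.','N','A','S','D','A','Q']]
      = stripKnownSuffixB t := by
  have hBK : ∀ c ∈ (['B','K'] : List Char), c ≠ '.' := by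
    intro c hc
    simp only [List.mem_cons, List.not_mem_nil, or_false] at hc
    rcases hc with rfl|rfl <;> decide
  have hUS : ∀ c ∈ (['U','S'] : List Char), c ≠ '.' := by
    intro c hc
    simp only [List.mem_cons, List.not_mem_nil, or_false] at hc
    rcases hc with rfl|rfl <;> decide
  have hNY : ∀ c ∈ (['N','Y','S','E'] : List Char), c ≠ '.' := by
    intro c hc
    simp only [List.mem_cons, List.not_mem_nil, or_false] at hc
    rcases hc with rfl|rfl|rfl|rfl <;> decide
  have hNA : ∀ c ∈ (['N','A','S','D','A','Q'] : List Char), c ≠ '.' := by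
    intro c hc
    simp only [List.mem_cons, List.not_mem_nil, or_false] at hc
    rcases hc with rfl|rfl|rfl|rfl|rfl|rfl <;> decide
  cases hq : t.reverse.dropWhile (· ≠ '.') with
  | nil =>
      have hfalse : ∀ (s : List Char), (∀ c ∈ s, c ≠ '.') →
          PySem.Chars.endswith t ('.' :: s) = false := by
        intro s hsf
        rw [Bool.eq_false_iff]
        intro h
        exact ((ends_iff t s hsf).mp h).1 hq
      simp only [normSuffixLoopA, stripKnownSuffixB, rpartitionDot, hq,
        hfalse _ hBK, hfalse _ hUS, hfalse _ hNY, hfalse _ hNA]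
      simp
  | cons c rest =>
      have hc : c = '.' := by
        have := dropWhile_head_false (fun c => decide (c ≠ '.')) t.reverse c rest hq
        simpa using this
      subst hc
      set p := t.reverse.takeWhile (· ≠ '.') with hp
      have hne : ∀ (s : List Char), (∀ c ∈ s, c ≠ '.') → p ≠ s.reverse →
          PySem.Chars.endswith t ('.' :: s) = false := by
        intro s hsf hneq
        rw [Bool.eq_false_iff]; intro h
        exact hneq (((ends_iff t s hsf).mp h).2)
      have hpos : ∀ (s : List Char), (∀ c ∈ s, c ≠ '.') → p = s.reverse →
          PySem.Chars.endswith t ('.' :: s) = true := by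
        intro s hsf heq
        exact (ends_iff t s hsf).mpr ⟨by rw [hq]; simp, heq⟩
      have hrevne : ∀ (s : List Char), p ≠ s.reverse → p.reverse ≠ s := by
        intro s h hcon
        exact h (by rw [← hcon]; simp)
      by_cases h1 : p = ['B','K'].reverse
      · have := strip_pos t ['B','K'] rest hq h1
        have hsuf : p.reverse = (['B','K'] : List Char) := by rw [h1]; simp
        simp only [normSuffixLoopA, stripKnownSuffixB, rpartitionDot, hq,
          hpos _ hBK h1, if_true, this.1]
        rw [if_pos ⟨by simp, by rw [hsuf]; simp⟩]
      · by_cases h2 : p = ['U','S'].reverse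
        · have := strip_pos t ['U','S'] rest hq h2
          have hsuf : p.reverse = (['U','S'] : List Char) := by rw [h2]; simp
          simp only [normSuffixLoopA, stripKnownSuffixB, rpartitionDot, hq,
            hne _ hBK h1, hpos _ hUS h2, Bool.false_eq_true, if_false, if_true, this.1]
          rw [if_pos ⟨by simp, by rw [hsuf]; simp⟩]
        · by_cases h3 : p = ['N','Y','S','E'].reverse
          · have := strip_pos t ['N','Y','S','E'] rest hq h3
            have hsuf : p.reverse = (['N','Y','S','E'] : List Char) := by rw [h3]; simp
            simp only [normSuffixLoopA, stripKnownSuffixB, rpartitionDot, hq,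
              hne _ hBK h1, hne _ hUS h2, hpos _ hNY h3, Bool.false_eq_true, if_false, if_true, this.1]
            rw [if_pos ⟨by simp, by rw [hsuf]; simp⟩]
          · by_cases h4 : p = ['N','A','S','D','A','Q'].reverse
            · have := strip_pos t ['N','A','S','D','A','Q'] rest hq h4
              have hsuf : p.reverse = (['N','A','S','D','A','Q'] : List Char) := by rw [h4]; simp
              simp only [normSuffixLoopA, stripKnownSuffixB, rpartitionDot, hq,
                hne _ hBK h1, hne _ hUS h2, hne _ hNY h3, hpos _ hNA h4,
                Bool.false_eq_true, if_false, if_true, this.1]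
              rw [if_pos ⟨by simp, by rw [hsuf]; simp⟩]
            · simp only [normSuffixLoopA, stripKnownSuffixB, rpartitionDot, hq,
                hne _ hBK h1, hne _ hUS h2, hne _ hNY h3, hne _ hNA h4,
                Bool.false_eq_true, if_false]
              rw [if_neg]
              rintro ⟨-, hmem⟩
              simp only [List.mem_cons, List.not_mem_nil, or_false] at hmem
              rcases hmem with h | h | h | h
              · exact hrevne _ h1 h
              · exact hrevne _ h2 h
              · exact hrevne _ h3 h
              · exact hrevne _ h4 h

-- ===== VERDICT (by name: the statement is the Claim_ definition above) =====
theorem normalize_ticker_spec : Claim_equal_normalize_ticker := by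
  intro ticker market _
  unfold Spec_normalize_ticker normalize_ticker normalize_ticker_alt
  simp only [core_eq]
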